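-- pv_equiv track=rewrite | github.com/ShiweiHe0713/Algorithms-Made-Easy | 4_dp/746_min_cost_climbing_stairs.py | minCostClimbingStairs_ksteps_tab
-- ===== SOURCE A (Python) =====
-- def minCostClimbingStairs_ksteps_tab(cost, k):
--     n = len(cost)
--     dp = [0] * (n+1)
--
--     # Have to start from 2 not 1 or 0
--     for i in range(2, n+1):
--         ceiling = min(i,k)
--         best = float('inf')
--         for j in range(1, ceiling + 1):
--             best = min(best, dp[i-j] + cost[i-j])
--         dp[i] = best
--
--     return dp[-1]
-- ===== SOURCE B (Python) =====
-- def minCostClimbingStairs_ksteps_tab(cost, k):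
--     # O(n) sliding-window minimum via a two-stack min-queue (A recomputes each window min, O(n*k)).
--     n = len(cost)
--     if n <= 1:
--         return 0
--     front, back = [], []  # stacks of (value, min of this entry and everything below it)
--
--     def push(stk, x):
--         m = x if not stk else min(x, stk[-1][1])
--         stk.append((x, m))
--
--     push(back, cost[0])   # window value v[0] = dp[0] + cost[0] = cost[0]
--     d = 0                 # dp value of index i-1
--     for i in range(2, n + 1):
--         push(back, d + cost[i - 1])      # v[i-1] enters the window
--         if i - k >= 1:                   # v[i-1-k] leaves the window
--             if not front:
--                 while back:
--                     push(front, back.pop()[0])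
--             front.pop()
--         if front and back:
--             d = min(front[-1][1], back[-1][1])
--         elif front:
--             d = front[-1][1]
--         else:
--             d = back[-1][1]
--     return d
-- ===== Notes on version B (the rewrite author's own statement) =====
-- stated objective: faster
-- what changed: Replaces A's O(n*k) recomputation of each window minimum (inner loop over the last min(i,k) dp values) by an O(n) sliding-window minimum kept in a two-stack min-queue, so the inner scan disappears.
-- outside the precondition, e.g. on minCostClimbingStairs_ksteps_tab([1, 2], 0): A returns inf, B returns 2
import Mathlib
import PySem

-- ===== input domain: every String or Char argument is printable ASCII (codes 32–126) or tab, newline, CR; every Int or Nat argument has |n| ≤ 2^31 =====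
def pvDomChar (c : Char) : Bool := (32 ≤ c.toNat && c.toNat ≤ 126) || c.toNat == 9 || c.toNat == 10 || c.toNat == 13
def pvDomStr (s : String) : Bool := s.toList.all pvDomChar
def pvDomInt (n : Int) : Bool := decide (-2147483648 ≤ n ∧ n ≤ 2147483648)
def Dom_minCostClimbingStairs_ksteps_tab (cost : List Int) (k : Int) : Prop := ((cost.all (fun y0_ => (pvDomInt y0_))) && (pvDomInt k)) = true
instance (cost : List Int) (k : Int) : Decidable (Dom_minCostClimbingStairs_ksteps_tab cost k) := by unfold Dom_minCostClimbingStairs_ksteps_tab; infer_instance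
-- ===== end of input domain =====

-- B replaces A's O(n*k) recomputation of each window minimum by an O(n) two-stack min-queue
-- (sliding-window minimum); objective: faster (asymptotic).

-- ===== PORT A =====
-- 'best = float('inf')' then repeated 'min': modelled by Option Int, none = the initial inf
-- (under Pre_ the inner loop is nonempty, so the inf never survives into dp).
def pvMinO (b : Option Int) (x : Int) : Option Int :=
  match b with
  | none => some x
  | some b => some (min b x)

def minCostClimbingStairs_ksteps_tab (cost : List Int) (k : Int) : Int :=
  let n : Int := (cost.length : Int)
  let dp0 : List Int := List.replicate (cost.length + 1) 0
  let dp := (PySem.List.pyRange 2 (n + 1) 1).foldl (fun dp i =>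
      let ceiling := min i k
      -- dp[i-j], cost[i-j]: 0 ≤ i-j < length always holds here, so pyGetD is exact
      let best := (PySem.List.pyRange 1 (ceiling + 1) 1).foldl
        (fun best j => pvMinO best ((PySem.List.pyGetD dp (i - j) 0) + (PySem.List.pyGetD cost (i - j) 0))) none
      PySem.List.pySetD dp i (best.getD 0)) dp0
  PySem.List.pyGetD dp (-1) 0

-- ===== PORT B =====
-- a stack entry is (value, min of this entry and everything below it); head = Python's stk[-1]
def pvPush (s : List (Int × Int)) (x : Int) : List (Int × Int) :=
  match s with
  | [] => [(x, x)]
  | (y, m) :: t => (x, min x m) :: (y, m) :: t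

-- 'while back: push(front, back.pop()[0])' with front = []
def pvTransfer (back : List (Int × Int)) : List (Int × Int) :=
  back.foldl (fun f p => pvPush f p.1) []

-- the final if/elif/else of Source B; both-empty is unreachable (Python would raise IndexError)
def pvQmin (front back : List (Int × Int)) : Int :=
  match front, back with
  | (_, mf) :: _, (_, mb) :: _ => min mf mb
  | (_, mf) :: _, [] => mf
  | [], (_, mb) :: _ => mb
  | [], [] => 0

def pvStepB (cost : List Int) (k : Int) (st : List (Int × Int) × List (Int × Int) × Int) (i : Int) :
    List (Int × Int) × List (Int × Int) × Int :=
  let back := pvPush st.2.1 (st.2.2 + PySem.List.pyGetD cost (i - 1) 0)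
  let fb : List (Int × Int) × List (Int × Int) :=
    if 1 ≤ i - k then
      if st.1 = [] then ((pvTransfer back).tail, [])
      else (st.1.tail, back)
    else (st.1, back)
  (fb.1, fb.2, pvQmin fb.1 fb.2)

def minCostClimbingStairs_ksteps_tab_alt (cost : List Int) (k : Int) : Int :=
  let n : Int := (cost.length : Int)
  if n ≤ 1 then 0
  else
    let st := (PySem.List.pyRange 2 (n + 1) 1).foldl (pvStepB cost k)
      ([], pvPush [] (PySem.List.pyGetD cost 0 0), 0)
    st.2.2

-- ===== PRECONDITION & SPEC =====
-- Pre_ excludes k ≤ 0 with len(cost) ≥ 2: there A's inner loop is empty and A returns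
-- float('inf'), which is not an int (not a value of the declared return type).
def Pre_minCostClimbingStairs_ksteps_tab (cost : List Int) (k : Int) : Prop :=
  cost.length ≤ 1 ∨ 1 ≤ k
instance (cost : List Int) (k : Int) : Decidable (Pre_minCostClimbingStairs_ksteps_tab cost k) := by
  unfold Pre_minCostClimbingStairs_ksteps_tab; infer_instance

def pvWitness_minCostClimbingStairs_ksteps_tab : List Int × Int := ([10, 15, 20, 5], 2)

def Spec_minCostClimbingStairs_ksteps_tab (cost : List Int) (k : Int) (out : Int) : Prop := out = minCostClimbingStairs_ksteps_tab_alt cost k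
instance (cost : List Int) (k : Int) (out : Int) : Decidable (Spec_minCostClimbingStairs_ksteps_tab cost k out) := by unfold Spec_minCostClimbingStairs_ksteps_tab; infer_instance

-- ===== CLAIM (what is proved, stated in full; the proofs are below) =====
def Claim_equal_minCostClimbingStairs_ksteps_tab : Prop := ∀ (cost : List Int) (k : Int), Dom_minCostClimbingStairs_ksteps_tab cost k → Pre_minCostClimbingStairs_ksteps_tab cost k → Spec_minCostClimbingStairs_ksteps_tab cost k (minCostClimbingStairs_ksteps_tab cost k)

-- ===== LEMMAS AND PROOFS =====

-- min over a list through the Option accumulator (none = Python's float('inf'))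
def pvWminO (l : List Int) : Option Int := l.foldl pvMinO none
def pvWmin (l : List Int) : Int := (pvWminO l).getD 0

-- v-values v[0..m]: v[j] = dp[j] + cost[j], built left to right
def pvVA (cost : List Int) (k : Int) : Nat → List Int
  | 0 => [cost.getD 0 0]
  | 1 => [cost.getD 0 0, cost.getD 1 0]
  | (q + 2) => pvVA cost k (q + 1) ++ [pvWmin ((pvVA cost k (q + 1)).drop (q + 2 - k.toNat)) + cost.getD (q + 2) 0]

def pvDpv (cost : List Int) (k : Int) : Nat → Int
  | 0 => 0
  | 1 => 0
  | (q + 2) => pvWmin ((pvVA cost k (q + 1)).drop (q + 2 - k.toNat))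

def pvLastV (cost : List Int) (k : Int) (j : Nat) : Int := pvDpv cost k j + cost.getD j 0

lemma pvMinO_swap (t : List Int) : ∀ (o : Option Int) (x : Int),
    t.foldl pvMinO (pvMinO o x) = pvMinO (t.foldl pvMinO o) x := by
  induction t with
  | nil => intro o x; rfl
  | cons y t ih =>
    intro o x
    have h : pvMinO (pvMinO o x) y = pvMinO (pvMinO o y) x := by
      cases o <;> simp [pvMinO, min_comm, min_left_comm]
    simp only [List.foldl_cons, h, ih]

lemma pvWminO_reverse (l : List Int) : pvWminO l.reverse = pvWminO l := by
  suffices h : ∀ (o : Option Int), l.reverse.foldl pvMinO o = l.foldl pvMinO o by exact h none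
  induction l with
  | nil => intro o; rfl
  | cons x t ih =>
    intro o
    simp only [List.reverse_cons, List.foldl_append, List.foldl_cons, List.foldl_nil, ih]
    exact (pvMinO_swap t o x).symm

lemma pvFoldl_some (l : List Int) : ∀ (a : Int),
    l.foldl pvMinO (some a) = some ((pvWminO l).elim a (min a)) := by
  induction l with
  | nil => intro a; rfl
  | cons x t ih =>
    intro a
    have h1 : pvWminO (x :: t) = t.foldl pvMinO (some x) := rfl
    simp only [List.foldl_cons, pvMinO, ih, h1]
    cases hw : pvWminO t <;> simp [Option.elim, min_comm, min_left_comm]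

lemma pvWminO_isSome (l : List Int) (h : l ≠ []) : pvWminO l = some (pvWmin l) := by
  cases l with
  | nil => exact absurd rfl h
  | cons x t =>
    have : pvWminO (x :: t) = t.foldl pvMinO (some x) := rfl
    rw [pvWmin, this, pvFoldl_some t x]
    simp

lemma pvWminO_append (l1 l2 : List Int) :
    pvWminO (l1 ++ l2) = l2.foldl pvMinO (pvWminO l1) := by
  simp [pvWminO, List.foldl_append]

-- the stack min-field invariant
def pvGood : List (Int × Int) → Prop
  | [] => True
  | (x, m) :: t => pvGood t ∧ some m = pvWminO (x :: t.map Prod.fst)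

lemma pvGood_push (s : List (Int × Int)) (x : Int) (h : pvGood s) : pvGood (pvPush s x) := by
  cases s with
  | nil =>
    simp [pvPush, pvGood, pvWminO, pvMinO]
  | cons p t =>
    obtain ⟨y, m⟩ := p
    obtain ⟨ht, hm⟩ := h
    refine ⟨⟨ht, hm⟩, ?_⟩
    simp only [List.map_cons]
    have h2 : pvWminO (x :: y :: t.map Prod.fst) = (y :: t.map Prod.fst).foldl pvMinO (some x) := rfl
    rw [h2, pvFoldl_some, ← hm]
    simp [Option.elim]

lemma pvVals_push (s : List (Int × Int)) (x : Int) :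
    (pvPush s x).map Prod.fst = x :: s.map Prod.fst := by
  cases s with
  | nil => rfl
  | cons p t => obtain ⟨y, m⟩ := p; rfl

lemma pvGood_tail (s : List (Int × Int)) (h : pvGood s) : pvGood s.tail := by
  cases s with
  | nil => exact h
  | cons p t => obtain ⟨y, m⟩ := p; exact h.1

lemma pvTransfer_aux (back : List (Int × Int)) : ∀ (acc : List (Int × Int)), pvGood acc →
    pvGood (back.foldl (fun f p => pvPush f p.1) acc) ∧
    (back.foldl (fun f p => pvPush f p.1) acc).map Prod.fst = (back.map Prod.fst).reverse ++ acc.map Prod.fst := by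
  induction back with
  | nil => intro acc h; exact ⟨h, by simp⟩
  | cons p t ih =>
    intro acc h
    obtain ⟨hg, hv⟩ := ih (pvPush acc p.1) (pvGood_push acc p.1 h)
    refine ⟨hg, ?_⟩
    simp only [List.foldl_cons, hv, pvVals_push]
    simp

lemma pvTransfer_good (back : List (Int × Int)) : pvGood (pvTransfer back) :=
  (pvTransfer_aux back [] trivial).1

lemma pvTransfer_vals (back : List (Int × Int)) :
    (pvTransfer back).map Prod.fst = (back.map Prod.fst).reverse := by
  have := (pvTransfer_aux back [] trivial).2
  simpa [pvTransfer] using this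

lemma pvQmin_spec (f b : List (Int × Int)) (hf : pvGood f) (hb : pvGood b)
    (hne : f.map Prod.fst ++ (b.map Prod.fst).reverse ≠ []) :
    some (pvQmin f b) = pvWminO (f.map Prod.fst ++ (b.map Prod.fst).reverse) := by
  rw [pvWminO_append]
  cases f with
  | nil =>
    cases b with
    | nil => simp at hne
    | cons p t =>
      obtain ⟨y, m⟩ := p
      have hbh : some m = pvWminO (y :: t.map Prod.fst) := hb.2
      have hrev : ((y :: t.map Prod.fst).reverse).foldl pvMinO none
          = pvWminO (y :: t.map Prod.fst) := pvWminO_reverse _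
      simp only [List.map_cons, List.map_nil, pvQmin]
      rw [show pvWminO ([] : List Int) = none from rfl, hrev, ← hbh]
  | cons p t =>
    obtain ⟨y, m⟩ := p
    have hfh : some m = pvWminO (y :: t.map Prod.fst) := hf.2
    cases b with
    | nil =>
      simpa only [List.map_cons, List.map_nil, List.reverse_nil, List.foldl_nil, pvQmin] using hfh
    | cons q u =>
      obtain ⟨z, mb⟩ := q
      have hbh : some mb = pvWminO (z :: u.map Prod.fst) := hb.2
      simp only [List.map_cons, pvQmin]
      rw [← hfh]
      have hfold : ((z :: u.map Prod.fst).reverse).foldl pvMinO (some m)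
          = some ((pvWminO ((z :: u.map Prod.fst).reverse)).elim m (min m)) := pvFoldl_some _ m
      rw [hfold, pvWminO_reverse, ← hbh]
      simp [Option.elim]

-- list facts about pvVA
lemma pvVA_succ (cost : List Int) (k : Int) (m : Nat) :
    pvVA cost k (m + 1) = pvVA cost k m ++ [pvLastV cost k (m + 1)] := by
  cases m with
  | zero => simp [pvVA, pvLastV, pvDpv]
  | succ q => simp [pvVA, pvLastV, pvDpv]

lemma pvVA_eq_map (cost : List Int) (k : Int) : ∀ m,
    pvVA cost k m = (List.range (m + 1)).map (pvLastV cost k) := by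
  intro m
  induction m with
  | zero => simp [pvVA, pvLastV, pvDpv, List.range_succ]
  | succ q ih => rw [pvVA_succ, ih, List.range_succ]; simp [List.range_succ]

lemma pvVA_length (cost : List Int) (k : Int) (m : Nat) : (pvVA cost k m).length = m + 1 := by
  rw [pvVA_eq_map]; simp

-- the reversed window, as A's inner loop visits it
lemma pvWindow_reverse (cost : List Int) (k : Int) (m t : Nat) (ht : t ≤ m + 1) :
    ((pvVA cost k m).drop (m + 1 - t)).reverse = (List.range t).map (fun s => pvLastV cost k (m - s)) := by
  rw [pvVA_eq_map]
  apply List.ext_getElem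
  · simp only [List.length_reverse, List.length_drop, List.length_map, List.length_range]
    omega
  · intro i h1 h2
    have hi : i < t := by
      simp only [List.length_reverse, List.length_drop, List.length_map, List.length_range] at h1
      omega
    simp only [List.getElem_reverse, List.getElem_drop, List.getElem_map, List.getElem_range,
      List.length_drop, List.length_map, List.length_range]
    congr 1
    omega

-- peeling the Python range(2, n+1) from the right
lemma pvRange2_succ (m : Nat) (hm : 1 ≤ m) :
    PySem.List.pyRange 2 ((m : Int) + 1 + 1) 1 = PySem.List.pyRange 2 ((m : Int) + 1) 1 ++ [(m : Int) + 1] := by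
  have h : (2 : Int) ≤ (m : Int) + 1 := by omega
  exact PySem.List.pyRange_one_succ_right h

-- ----- A-side invariant -----

def pvDpList (cost : List Int) (k : Int) (m : Nat) : List Int :=
  (List.range (m + 1)).map (pvDpv cost k) ++ List.replicate (cost.length - m) 0

lemma pvSetD_natCast (xs : List Int) (n : Nat) (v : Int) (h : n < xs.length) :
    PySem.List.pySetD xs (n : Int) v = xs.set n v := by
  simp [PySem.List.pySetD, PySem.List.pySet?, PySem.List.pyIdx?, h]

lemma pvA_inner (cost : List Int) (k : Int) (m : Nat) (hk : 1 ≤ k) (hm : 1 ≤ m)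
    (hmn : m + 1 ≤ cost.length) :
    (PySem.List.pyRange 1 (min ((m : Int) + 1) k + 1) 1).foldl
      (fun best j => pvMinO best ((PySem.List.pyGetD (pvDpList cost k m) (((m : Int) + 1) - j) 0)
        + (PySem.List.pyGetD cost (((m : Int) + 1) - j) 0))) none
    = some (pvDpv cost k (m + 1)) := by
  have hbody : ∀ (o : Option Int) (s : Nat), s ≤ m →
      pvMinO o ((PySem.List.pyGetD (pvDpList cost k m) (((m : Int) + 1) - (((s : Nat) : Int) + 1)) 0)
        + (PySem.List.pyGetD cost (((m : Int) + 1) - (((s : Nat) : Int) + 1)) 0))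
      = pvMinO o (pvLastV cost k (m - s)) := by
    intro o s hs
    have hidx : ((m : Int) + 1) - (((s : Nat) : Int) + 1) = ((m - s : Nat) : Int) := by omega
    rw [hidx, PySem.List.pyGetD_natCast, PySem.List.pyGetD_natCast]
    have hlt : m - s < m + 1 := by omega
    have hdp : (pvDpList cost k m).getD (m - s) 0 = pvDpv cost k (m - s) := by
      rw [pvDpList, List.getD_eq_getElem?_getD, List.getElem?_append_left (by simp),
        List.getElem?_map]
      simp [hlt]
    rw [hdp, pvLastV]
  have key : ∀ t : Nat, t ≤ m + 1 →
      (PySem.List.pyRange 1 (((t : Nat) : Int) + 1) 1).foldl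
        (fun best j => pvMinO best ((PySem.List.pyGetD (pvDpList cost k m) (((m : Int) + 1) - j) 0)
          + (PySem.List.pyGetD cost (((m : Int) + 1) - j) 0))) none
      = pvWminO ((List.range t).map (fun s => pvLastV cost k (m - s))) := by
    intro t
    induction t with
    | zero =>
      intro _
      rw [show (((0 : Nat) : Nat) : Int) + 1 = (1 : Int) by norm_num]
      rw [show PySem.List.pyRange 1 1 1 = [] by decide]
      rfl
    | succ r ih =>
      intro hr
      rw [show (((r + 1 : Nat) : Nat) : Int) + 1 = (((r : Nat) : Int) + 1) + 1 by push_cast; ring]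
      rw [PySem.List.pyRange_one_succ_right (by omega : (1 : Int) ≤ ((r : Nat) : Int) + 1),
        List.foldl_append]
      simp only [List.foldl_cons, List.foldl_nil]
      rw [ih (by omega), List.range_succ, List.map_append, pvWminO_append]
      simp only [List.map_cons, List.map_nil, List.foldl_cons, List.foldl_nil]
      exact hbody _ r (by omega)
  set t : Nat := (min ((m : Int) + 1) k).toNat with htdef
  have hcast : min ((m : Int) + 1) k = (t : Int) := by omega
  have htm : t ≤ m + 1 := by omega
  rw [hcast, key t htm, ← pvWindow_reverse cost k m t htm, pvWminO_reverse]
  have hwin : m + 1 - t = m + 1 - k.toNat := by omega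
  rw [hwin]
  have hne : (pvVA cost k m).drop (m + 1 - k.toNat) ≠ [] := by
    have hlen := pvVA_length cost k m
    intro hcon
    have := congrArg List.length hcon
    simp [hlen] at this
    omega
  rw [pvWminO_isSome _ hne]
  cases m with
  | zero => omega
  | succ q => rfl

lemma pvA_invariant (cost : List Int) (k : Int) (hk : 1 ≤ k) : ∀ (m : Nat), 1 ≤ m → m ≤ cost.length →
    (PySem.List.pyRange 2 ((m : Int) + 1) 1).foldl (fun dp i =>
      PySem.List.pySetD dp i
        (((PySem.List.pyRange 1 (min i k + 1) 1).foldl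
          (fun best j => pvMinO best ((PySem.List.pyGetD dp (i - j) 0) + (PySem.List.pyGetD cost (i - j) 0))) none).getD 0))
      (List.replicate (cost.length + 1) 0)
    = pvDpList cost k m := by
  intro m
  induction m with
  | zero => omega
  | succ q ih =>
    intro _ hqn
    by_cases hq : 1 ≤ q
    · have hdp := ih hq (by omega)
      rw [show ((q + 1 : Nat) : Int) + 1 = ((q : Int) + 1) + 1 by push_cast; ring,
        pvRange2_succ q hq, List.foldl_append]
      simp only [List.foldl_cons, List.foldl_nil]
      rw [hdp]
      have hinner := pvA_inner cost k q hk hq (by omega)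
      rw [hinner]
      simp only [Option.getD_some]
      -- now the set
      have hidx : ((q : Int) + 1) = ((q + 1 : Nat) : Int) := by push_cast; ring
      rw [hidx]
      rw [pvSetD_natCast _ _ _ (by simp [pvDpList]; omega)]
      rw [pvDpList, List.set_append, if_neg (by simp)]
      simp only [List.length_map, List.length_range, Nat.sub_self]
      rw [show cost.length - q = (cost.length - (q + 1)) + 1 by omega, List.replicate_succ]
      rw [List.set_cons_zero]
      rw [pvDpList, List.range_succ, List.map_append]
      simp [List.range_succ]
    · have hq0 : q = 0 := by omega
      subst hq0
      have : PySem.List.pyRange 2 ((1 : Nat) + 1 : Int) 1 = [] := by decide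
      rw [show (((0:Nat) + 1 : Nat) : Int) = (1 : Int) by norm_num] at *
      rw [this]
      simp only [List.foldl_nil]
      rw [pvDpList]
      have : (List.range 2).map (pvDpv cost k) = [0, 0] := by
        simp [List.range_succ, pvDpv]
      rw [this]
      have h2 : cost.length + 1 = 2 + (cost.length - 1) := by omega
      rw [h2, List.replicate_add]
      rfl

-- ----- B-side invariant -----

lemma pvB_invariant (cost : List Int) (k : Int) (hk : 1 ≤ k) : ∀ (m : Nat), 1 ≤ m → m ≤ cost.length →
    ∃ f b : List (Int × Int),
      (PySem.List.pyRange 2 ((m : Int) + 1) 1).foldl (pvStepB cost k)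
        ([], pvPush [] (PySem.List.pyGetD cost 0 0), 0) = (f, b, pvDpv cost k m) ∧
      pvGood f ∧ pvGood b ∧
      f.map Prod.fst ++ (b.map Prod.fst).reverse = (pvVA cost k (m - 1)).drop (m - k.toNat) := by
  intro m
  induction m with
  | zero => omega
  | succ q ih =>
    intro _ hqn
    by_cases hq : 1 ≤ q
    · obtain ⟨f, b, hst, hgf, hgb, hvals⟩ := ih hq (by omega)
      rw [show ((q + 1 : Nat) : Int) + 1 = ((q : Int) + 1) + 1 by push_cast; ring,
        pvRange2_succ q hq, List.foldl_append]
      simp only [List.foldl_cons, List.foldl_nil]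
      rw [hst]
      -- the push
      have hget : PySem.List.pyGetD cost (((q : Int) + 1) - 1) 0 = cost.getD q 0 := by
        rw [show ((q : Int) + 1) - 1 = ((q : Nat) : Int) by ring, PySem.List.pyGetD_natCast]
      have hpushvals : (pvPush b (pvDpv cost k q + cost.getD q 0)).map Prod.fst
          = pvLastV cost k q :: b.map Prod.fst := by
        rw [pvVals_push]; rfl
      set b' : List (Int × Int) := pvPush b (pvDpv cost k q + cost.getD q 0) with hb'
      have hgb' : pvGood b' := pvGood_push b _ hgb
      have hcontents' : f.map Prod.fst ++ (b'.map Prod.fst).reverse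
          = (pvVA cost k q).drop (q - k.toNat) := by
        rw [hpushvals]
        simp only [List.reverse_cons, ← List.append_assoc, hvals]
        rw [show q = (q - 1) + 1 by omega, pvVA_succ]
        rw [show (q - 1) + 1 - k.toNat = q - k.toNat from by omega] at *
        rw [List.drop_append_of_le_length (by rw [pvVA_length]; omega)]
        rw [show (q-1) + 1 = q by omega]
      -- the pop
      have hkt : 1 ≤ k.toNat := by omega
      set st2 : List (Int × Int) × List (Int × Int) :=
        if 1 ≤ ((q : Int) + 1) - k then (if f = [] then ((pvTransfer b').tail, []) else (f.tail, b'))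
        else (f, b') with hst2
      have hnew : pvGood st2.1 ∧ pvGood st2.2 ∧
          st2.1.map Prod.fst ++ (st2.2.map Prod.fst).reverse
            = (pvVA cost k q).drop (q + 1 - k.toNat) := by
        by_cases hpop : 1 ≤ ((q : Int) + 1) - k
        · have hkq : k.toNat ≤ q := by omega
          have hdropped : ((pvVA cost k q).drop (q - k.toNat)).tail
              = (pvVA cost k q).drop (q + 1 - k.toNat) := by
            rw [List.tail_drop]; congr 1; omega
          by_cases hf : f = []
          · rw [hst2]
            simp only [if_pos hpop, if_pos hf]
            refine ⟨pvGood_tail _ (pvTransfer_good b'), trivial, ?_⟩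
            have hv : (pvTransfer b').map Prod.fst = (b'.map Prod.fst).reverse := pvTransfer_vals b'
            have htail : ((pvTransfer b').tail).map Prod.fst = ((pvTransfer b').map Prod.fst).tail := by
              cases pvTransfer b' <;> simp
            rw [htail, hv]
            rw [hf] at hcontents'
            simp only [List.map_nil, List.nil_append] at hcontents'
            simp only [List.map_nil, List.append_nil, List.reverse_nil]
            rw [hcontents', hdropped]
          · rw [hst2]
            simp only [if_pos hpop, if_neg hf]
            refine ⟨pvGood_tail _ hgf, hgb', ?_⟩
            have htail : (f.tail).map Prod.fst = (f.map Prod.fst).tail := by cases f <;> simp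
            rw [htail]
            have hfne : f.map Prod.fst ≠ [] := by
              intro hcon; apply hf; cases f; rfl; simp at hcon
            rw [← List.tail_append_of_ne_nil hfne, hcontents', hdropped]
        · rw [hst2]
          simp only [if_neg hpop]
          refine ⟨hgf, hgb', ?_⟩
          rw [hcontents']
          congr 1
          omega
      obtain ⟨hg1, hg2, hcont⟩ := hnew
      have hcne : st2.1.map Prod.fst ++ (st2.2.map Prod.fst).reverse ≠ [] := by
        rw [hcont]
        intro hcon
        have := congrArg List.length hcon
        rw [List.length_drop, pvVA_length] at this
        simp at this
        omega
      have hq2 := pvQmin_spec st2.1 st2.2 hg1 hg2 hcne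
      rw [hcont] at hq2
      have hdp : pvDpv cost k (q + 1) = pvWmin ((pvVA cost k q).drop (q + 1 - k.toNat)) := by
        cases q with
        | zero => omega
        | succ r => rfl
      have hwm := pvWminO_isSome _ (by
        intro hcon
        have := congrArg List.length hcon
        rw [List.length_drop, pvVA_length] at this
        simp at this
        omega : (pvVA cost k q).drop (q + 1 - k.toNat) ≠ [])
      rw [hwm] at hq2
      refine ⟨st2.1, st2.2, ?_, hg1, hg2, by rw [show q + 1 - 1 = q by omega]; exact hcont⟩
      have hqeq : pvQmin st2.1 st2.2 = pvDpv cost k (q + 1) := by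
        rw [hdp]; exact Option.some_injective _ hq2
      simp only [pvStepB, hget, ← hb']
      rw [← hst2, hqeq]
    · have hq0 : q = 0 := by omega
      subst hq0
      refine ⟨[], pvPush [] (PySem.List.pyGetD cost 0 0), ?_, trivial, ?_, ?_⟩
      · have hr : PySem.List.pyRange 2 ((((0:Nat) + 1 : Nat) : Int) + 1) 1 = [] := by decide
        rw [hr]
        simp [pvDpv]
      · have h0 : PySem.List.pyGetD cost 0 0 = cost.getD 0 0 := by
          rw [show (0 : Int) = ((0 : Nat) : Int) by norm_num, PySem.List.pyGetD_natCast]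
        rw [h0]
        exact pvGood_push [] _ trivial
      · have h0 : PySem.List.pyGetD cost 0 0 = cost.getD 0 0 := by
          rw [show (0 : Int) = ((0 : Nat) : Int) by norm_num, PySem.List.pyGetD_natCast]
        rw [h0, pvVals_push, show (1 : Nat) - k.toNat = 0 by omega]
        simp [pvVA]

-- ===== VERDICT (by name: the statement is the Claim_ definition above) =====
theorem minCostClimbingStairs_ksteps_tab_spec : Claim_equal_minCostClimbingStairs_ksteps_tab := by
  intro cost k _ hpre
  unfold Spec_minCostClimbingStairs_ksteps_tab
  unfold minCostClimbingStairs_ksteps_tab minCostClimbingStairs_ksteps_tab_alt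
  by_cases hn : cost.length ≤ 1
  · -- both sides are 0
    have hr : PySem.List.pyRange 2 ((cost.length : Int) + 1) 1 = [] := by
      interval_cases h : cost.length <;> decide
    simp only [hr, List.foldl_nil, if_pos (by exact_mod_cast hn : (cost.length : Int) ≤ 1)]
    have hne : List.replicate (cost.length + 1) (0 : Int) ≠ [] := by simp
    rw [show List.replicate (cost.length + 1) (0:Int) = List.replicate cost.length 0 ++ [0] by
      rw [← List.replicate_succ']]
    rw [PySem.List.pyGetD_neg_one_append_singleton]
  · have hk : 1 ≤ k := by
      cases hpre with
      | inl h => omega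
      | inr h => exact h
    have hn2 : 2 ≤ cost.length := by omega
    set n : Nat := cost.length with hndef
    have hA := pvA_invariant cost k hk n (by omega) (le_refl n)
    have hB := pvB_invariant cost k hk n (by omega) (le_refl n)
    obtain ⟨f, b, hst, _, _, _⟩ := hB
    rw [if_neg (by omega : ¬ ((n : Int) ≤ 1))]
    rw [hst]
    simp only []
    rw [hA]
    rw [pvDpList, show n - n = 0 by omega, List.replicate_zero, List.append_nil,
      List.range_succ, List.map_append]
    simp only [List.map_cons, List.map_nil]
    rw [PySem.List.pyGetD_neg_one_append_singleton]
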